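-- pv_equiv track=rewrite | github.com/ethorondor/leetcode | archive/code/archive/review/cafeteria.py | cafeteria
-- ===== SOURCE A (Python) =====
-- def cafeteria(N,K,M,S):
--     S.sort()
--     l = S[0]
--     ans = 0
--     while l - (K+1) > 0:
--         ans += 1
--         l = l-(K+1)
--     l = S[-1]
--     while l + (K+1) <= N:
--         ans += 1
--         l = l + K+1
--     for i in range(len(S)-1):
--         l = S[i]
--         r = S[i+1]
--         while r - l >= 2*K+2:
--             ans += 1
--             l = l + K+1
--
--     return ans
-- ===== SOURCE B (Python) =====
-- def cafeteria(N, K, M, S):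
--     d = K + 1
--     T = sorted(S)
--     ans = max(0, (T[0] - 1) // d)
--     ans += max(0, (N - T[-1]) // d)
--     ans += sum(max(0, (r - l) // d - 1) for l, r in zip(T, T[1:]))
--     return ans
-- ===== Notes on version B (the rewrite author's own statement) =====
-- stated objective: alternative
-- what changed: Each of A's three unit-step counting while-loops (walk left of the minimum, right of the maximum, and across every adjacent sorted gap) is replaced by a closed-form floor-division formula, so B does O(1) arithmetic per gap instead of iterating gap/(K+1) times.
-- outside the precondition, e.g. on cafeteria(-10, -2, 0, [-5]): A returns 0, B returns 11
import Mathlib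
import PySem

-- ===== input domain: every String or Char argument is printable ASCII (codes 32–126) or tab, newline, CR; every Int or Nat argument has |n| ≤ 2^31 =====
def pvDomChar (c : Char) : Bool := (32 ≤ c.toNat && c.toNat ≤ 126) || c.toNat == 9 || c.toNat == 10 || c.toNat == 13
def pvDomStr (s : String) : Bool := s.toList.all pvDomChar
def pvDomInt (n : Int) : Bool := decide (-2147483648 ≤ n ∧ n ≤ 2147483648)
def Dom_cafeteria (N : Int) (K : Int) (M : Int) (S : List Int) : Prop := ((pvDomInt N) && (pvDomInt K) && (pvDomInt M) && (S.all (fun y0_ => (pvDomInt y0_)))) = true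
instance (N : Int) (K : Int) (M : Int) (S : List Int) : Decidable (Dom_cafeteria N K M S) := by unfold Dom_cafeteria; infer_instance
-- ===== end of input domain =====

-- B replaces A's three unit-step counting while-loops by closed-form floor-division
-- formulas per sorted gap (objective: alternative). A sorts S in place; the equivalence
-- proved here is about the RETURN value only (B does not mutate S).

-- ===== PORT A =====
-- 'while l - (K+1) > 0: ans += 1; l = l-(K+1)' — the '0 < d' guard only makes the
-- recursion total (when K+1 ≤ 0 the Python loop diverges; such K are outside Pre_).
def pvLoopLeft (l d ans : Int) : Int :=
  if h : 0 < d ∧ 0 < l - d then pvLoopLeft (l - d) d (ans + 1) else ans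
termination_by l.toNat
decreasing_by omega

-- 'while l + (K+1) <= N: ans += 1; l = l + K+1'
def pvLoopRight (l d N ans : Int) : Int :=
  if h : 0 < d ∧ l + d ≤ N then pvLoopRight (l + d) d N (ans + 1) else ans
termination_by (N - l).toNat
decreasing_by omega

-- 'while r - l >= 2*K+2: ans += 1; l = l + K+1'
def pvLoopGap (l r d ans : Int) : Int :=
  if h : 0 < d ∧ 2 * d ≤ r - l then pvLoopGap (l + d) r d (ans + 1) else ans
termination_by (r - l).toNat
decreasing_by omega

def cafeteria (N : Int) (K : Int) (M : Int) (S : List Int) : Int :=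
  let T := PySem.List.sorted S (fun x => x)                       -- S.sort()
  let a1 := pvLoopLeft (PySem.List.pyGetD T 0 0) (K + 1) 0        -- S[0]; default unreachable: Pre_ has S ≠ []
  let a2 := pvLoopRight (PySem.List.pyGetD T (-1) 0) (K + 1) N a1 -- S[-1]; ans threaded through
  (PySem.List.pyRange 0 ((T.length : Int) - 1) 1).foldl           -- for i in range(len(S)-1)
    (fun acc i => pvLoopGap (PySem.List.pyGetD T i 0) (PySem.List.pyGetD T (i + 1) 0) (K + 1) acc)
    a2

-- ===== PORT B =====
def cafeteria_alt (N : Int) (K : Int) (M : Int) (S : List Int) : Int :=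
  let d := K + 1
  let T := PySem.List.sorted S (fun x => x)                       -- T = sorted(S)
  max 0 (PySem.Int.floordiv (T.headD 0 - 1) d)                    -- max(0, (T[0]-1) // d)
    + max 0 (PySem.Int.floordiv (N - T.getLast?.getD 0) d)        -- max(0, (N-T[-1]) // d)
    + ((T.zip T.tail).map (fun p => max 0 (PySem.Int.floordiv (p.2 - p.1) d - 1))).sum

-- ===== PRECONDITION & SPEC =====
-- Pre_ restricts to the task's natural domain: S nonempty (A raises IndexError on [])
-- and K ≥ 0 (with a nonpositive step K+1 A's while-loops diverge on almost every input,
-- and B would divide by zero at K = -1).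
def Pre_cafeteria (N : Int) (K : Int) (M : Int) (S : List Int) : Prop := S ≠ [] ∧ 0 ≤ K
instance (N : Int) (K : Int) (M : Int) (S : List Int) : Decidable (Pre_cafeteria N K M S) := by
  unfold Pre_cafeteria; infer_instance

def pvWitness_cafeteria : Int × Int × Int × List Int := (10, 1, 2, [3, 7])

def Spec_cafeteria (N : Int) (K : Int) (M : Int) (S : List Int) (out : Int) : Prop := out = cafeteria_alt N K M S
instance (N : Int) (K : Int) (M : Int) (S : List Int) (out : Int) : Decidable (Spec_cafeteria N K M S out) := by unfold Spec_cafeteria; infer_instance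

-- ===== CLAIM (what is proved, stated in full; the proofs are below) =====
def Claim_equal_cafeteria : Prop := ∀ (N : Int) (K : Int) (M : Int) (S : List Int), Dom_cafeteria N K M S → Pre_cafeteria N K M S → Spec_cafeteria N K M S (cafeteria N K M S)

-- ===== LEMMAS AND PROOFS =====

theorem pvLoopLeft_eq (l d ans : Int) (hd : 0 < d) :
    pvLoopLeft l d ans = ans + max 0 ((l - 1) / d) := by
  induction l, ans using pvLoopLeft.induct (d := d) with
  | case1 l ans h ih =>
    rw [pvLoopLeft, dif_pos h, ih]
    have h1 : (1:Int) ≤ (l - 1) / d := by rw [Int.le_ediv_iff_mul_le hd]; omega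
    have h2 := Int.add_mul_ediv_right (l - 1) (-1) (by omega : d ≠ 0)
    rw [show l - d - 1 = l - 1 + -1 * d by ring, h2]; omega
  | case2 l ans h =>
    rw [pvLoopLeft, dif_neg h]
    have hl : l - d ≤ 0 := by by_contra hc; exact h ⟨hd, by omega⟩
    have h1 : (l - 1) / d < 1 := by rw [Int.ediv_lt_iff_lt_mul hd]; omega
    omega

theorem pvLoopRight_eq (l d N ans : Int) (hd : 0 < d) :
    pvLoopRight l d N ans = ans + max 0 ((N - l) / d) := by
  induction l, ans using pvLoopRight.induct (d := d) (N := N) with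
  | case1 l ans h ih =>
    rw [pvLoopRight, dif_pos h, ih]
    have h1 : (1:Int) ≤ (N - l) / d := by rw [Int.le_ediv_iff_mul_le hd]; omega
    have h2 := Int.add_mul_ediv_right (N - l) (-1) (by omega : d ≠ 0)
    rw [show N - (l + d) = N - l + -1 * d by ring, h2]; omega
  | case2 l ans h =>
    rw [pvLoopRight, dif_neg h]
    have hl : ¬ (l + d ≤ N) := by by_contra hc; exact h ⟨hd, by omega⟩
    have h1 : (N - l) / d < 1 := by rw [Int.ediv_lt_iff_lt_mul hd]; omega
    omega

theorem pvLoopGap_eq (l r d ans : Int) (hd : 0 < d) :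
    pvLoopGap l r d ans = ans + max 0 ((r - l) / d - 1) := by
  induction l, ans using pvLoopGap.induct (r := r) (d := d) with
  | case1 l ans h ih =>
    rw [pvLoopGap, dif_pos h, ih]
    have h1 : (2:Int) ≤ (r - l) / d := by rw [Int.le_ediv_iff_mul_le hd]; omega
    have h2 := Int.add_mul_ediv_right (r - l) (-1) (by omega : d ≠ 0)
    rw [show r - (l + d) = r - l + -1 * d by ring, h2]; omega
  | case2 l ans h =>
    rw [pvLoopGap, dif_neg h]
    have hl : ¬ (2 * d ≤ r - l) := by by_contra hc; exact h ⟨hd, by omega⟩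
    have h1 : (r - l) / d < 2 := by rw [Int.ediv_lt_iff_lt_mul hd]; omega
    omega

-- A's index loop over range(len(S)-1) equals B's sum over zip(T, T[1:]).
theorem pvFoldAux (g : Int → Int → Int) : ∀ (xs : List Int) (c : Int),
    (List.range (xs.length - 1)).foldl (fun a k => a + g (xs.getD k 0) (xs.getD (k+1) 0)) c
      = c + ((xs.zip xs.tail).map (fun p => g p.1 p.2)).sum
  | [], c => by simp
  | [x], c => by simp
  | x :: y :: r, c => by
    have ih := pvFoldAux g (y :: r) (c + g x y)
    simp only [List.length_cons, Nat.add_sub_cancel, List.range_succ_eq_map,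
      List.foldl_cons, List.foldl_map] at *
    simp only [List.getD_cons_zero, List.getD_cons_succ] at *
    rw [ih]
    simp [List.zip, add_assoc]

-- ===== VERDICT (by name: the statement is the Claim_ definition above) =====
theorem cafeteria_spec : Claim_equal_cafeteria := by
  intro N K M S _hDom hPre
  obtain ⟨hS, hK⟩ := hPre
  unfold Spec_cafeteria
  have hd : (0:Int) < K + 1 := by omega
  simp only [cafeteria, cafeteria_alt]
  set T := PySem.List.sorted S (fun x => x) with hTdef
  have hT : T ≠ [] := by
    rw [hTdef, Ne, PySem.List.sorted_eq_nil_iff]; exact hS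
  have hgap : ∀ l r ans : Int, pvLoopGap l r (K + 1) ans = ans + max 0 ((r - l) / (K + 1) - 1) :=
    fun l r ans => pvLoopGap_eq l r (K + 1) ans hd
  simp only [hgap]
  rw [PySem.List.pyRange_one]
  rw [List.foldl_map]
  simp only [sub_zero, zero_add, PySem.List.pyGetD_natCast]
  have hcast : ∀ (k : Nat), ((k : Int) + 1) = ((k + 1 : Nat) : Int) := by intro k; push_cast; ring
  have hfold := pvFoldAux (fun a b => max 0 ((b - a) / (K + 1) - 1)) T
    (pvLoopRight (PySem.List.pyGetD T (-1) 0) (K + 1) N (pvLoopLeft (PySem.List.pyGetD T 0 0) (K + 1) 0))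
  have hlen : (((T.length : Int) - 1)).toNat = T.length - 1 := by omega
  rw [hlen]
  simp only [hcast, PySem.List.pyGetD_natCast] at hfold ⊢
  rw [hfold]
  rw [PySem.List.pyGetD_zero, PySem.List.pyGetD_neg_one T 0 hT]
  rw [pvLoopLeft_eq _ _ _ hd, pvLoopRight_eq _ _ _ _ hd]
  have hh : T.getD 0 0 = T.headD 0 := by cases T <;> simp
  have hl : T.getLast hT = T.getLast?.getD 0 := by
    rw [List.getLast?_eq_some_getLast hT]; rfl
  simp only [hh, hl, PySem.Int.floordiv_eq_ediv_of_pos hd, zero_add]
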